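-- pv_equiv track=rewrite | github.com/cmsc201/201_Live | 13. More Lists/live.py | make_square_list
-- ===== SOURCE A (Python) =====
-- def make_square_list(dimension):
--     row_index = 0
--     two_dee_list = []
--     index = 0
--
--     while row_index < dimension:
--         col_index = 0
--         row = []
--         two_dee_list.append(row)
--         while col_index < dimension:
--             row.append(index)
--             index += 1
--             col_index += 1
--         row_index += 1
--
--     return two_dee_list
-- ===== SOURCE B (Python) =====
-- def make_square_list(dimension):
--     if dimension <= 0:
--         return []
--     flat = list(range(dimension * dimension))
--     rows = []
--     while flat:
--         rows.append(flat[-dimension:])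
--         del flat[-dimension:]
--     rows.reverse()
--     return rows
-- ===== Notes on version B (the rewrite author's own statement) =====
-- stated objective: alternative
-- what changed: Builds the whole flat sequence 0..n*n-1 once, then peels dimension-sized chunks off its end (cheap del of a tail slice), collecting rows back-to-front and reversing at the end; no counters threaded through nested loops.
import Mathlib
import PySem

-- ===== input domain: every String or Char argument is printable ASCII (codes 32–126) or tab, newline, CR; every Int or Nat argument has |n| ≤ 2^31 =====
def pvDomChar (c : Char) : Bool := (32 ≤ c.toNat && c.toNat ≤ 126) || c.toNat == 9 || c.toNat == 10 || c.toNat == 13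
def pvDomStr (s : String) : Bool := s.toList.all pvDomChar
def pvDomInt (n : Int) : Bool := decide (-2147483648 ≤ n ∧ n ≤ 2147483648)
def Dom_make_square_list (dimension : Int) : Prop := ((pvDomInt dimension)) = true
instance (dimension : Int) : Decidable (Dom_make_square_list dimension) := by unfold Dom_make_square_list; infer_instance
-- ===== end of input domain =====

-- B builds the flat sequence once, then peels dimension-sized chunks off its end into rows and reverses them (alternative decomposition; return values proved equal).


-- ===== PORT A =====
-- inner while loop: appends index to row while col_index < dimension; returns (row, index)
def mslInner (dimension col_index index : Int) (row : List Int) : List Int × Int :=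
  if _h : col_index < dimension then
    mslInner dimension (col_index + 1) (index + 1) (row ++ [index])
  else (row, index)
termination_by (dimension - col_index).toNat
decreasing_by omega

-- outer while loop: builds one row per iteration while row_index < dimension
def mslOuter (dimension row_index index : Int) (acc : List (List Int)) : List (List Int) :=
  if _h : row_index < dimension then
    match mslInner dimension 0 index [] with
    | (row, index') => mslOuter dimension (row_index + 1) index' (acc ++ [row])
  else acc
termination_by (dimension - row_index).toNat
decreasing_by omega

def make_square_list (dimension : Int) : List (List Int) :=
  mslOuter dimension 0 0 []

-- ===== PORT B =====
-- while flat: rows.append(flat[-dimension:]); del flat[-dimension:]   (then rows.reverse())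
-- (fuel = flat.length only makes the recursion total; each step with dimension ≥ 1 shortens flat)
def mslChunk (fuel : Nat) (dimension : Int) (flat : List Int) (rows : List (List Int)) : List (List Int) :=
  match fuel with
  | 0 => rows
  | f + 1 =>
    if flat = [] then rows
    else mslChunk f dimension (PySem.List.slice flat none (some (-dimension)))
           (rows ++ [PySem.List.slice flat (some (-dimension)) none])

def make_square_list_alt (dimension : Int) : List (List Int) :=
  if dimension ≤ 0 then []
  else
    let flat := PySem.List.pyRange 0 (dimension * dimension) 1
    (mslChunk flat.length dimension flat []).reverse

-- ===== PRECONDITION & SPEC =====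
def Spec_make_square_list (dimension : Int) (out : List (List Int)) : Prop := out = make_square_list_alt dimension
instance (dimension : Int) (out : List (List Int)) : Decidable (Spec_make_square_list dimension out) := by unfold Spec_make_square_list; infer_instance

-- ===== CLAIM =====
def Claim_equal_make_square_list : Prop := ∀ (dimension : Int), Dom_make_square_list dimension → Spec_make_square_list dimension (make_square_list dimension)

-- ===== LEMMAS AND PROOFS =====

-- A's inner loop appends exactly the sequential integers index .. index + (d - c) - 1
theorem mslInner_eq (d : Int) (k : Nat) :
    ∀ (c index : Int) (row : List Int), (d - c).toNat = k →
      mslInner d c index row =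
        (row ++ (List.range k).map (fun (j : Nat) => index + (j : Int)), index + (k : Int)) := by
  induction k with
  | zero =>
    intro c index row hk
    rw [mslInner]
    have hcd : ¬ c < d := by omega
    simp [hcd]
  | succ m ih =>
    intro c index row hk
    rw [mslInner]
    have hcd : c < d := by omega
    rw [dif_pos hcd, ih (c + 1) (index + 1) (row ++ [index]) (by omega)]
    simp only [Prod.mk.injEq]
    refine ⟨?_, by push_cast; ring⟩
    rw [List.append_assoc, List.range_succ_eq_map, List.map_cons, List.map_map]
    simp only [Function.comp_def, Nat.cast_zero, add_zero, List.singleton_append]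
    congr 1
    congr 1
    apply List.map_congr_left
    intro a _
    push_cast
    ring

-- A's outer loop builds one row per remaining iteration
theorem mslOuter_eq (d : Int) (k : Nat) :
    ∀ (r index : Int) (acc : List (List Int)), (d - r).toNat = k →
      mslOuter d r index acc =
        acc ++ (List.range k).map
          (fun (i : Nat) => (List.range d.toNat).map
            (fun (j : Nat) => index + (i : Int) * d + (j : Int))) := by
  induction k with
  | zero =>
    intro r index acc hk
    rw [mslOuter]
    have hrd : ¬ r < d := by omega
    simp [hrd]
  | succ m ih =>
    intro r index acc hk
    rw [mslOuter]
    have hrd : r < d := by omega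
    rw [dif_pos hrd]
    rw [mslInner_eq d d.toNat 0 index [] (by omega)]
    simp only [List.nil_append]
    rw [ih (r + 1) (index + (d.toNat : Int)) (acc ++ [(List.range d.toNat).map (fun (j : Nat) => index + (j : Int))]) (by omega)]
    rw [List.append_assoc]
    congr 1
    rw [List.range_succ_eq_map, List.map_cons, List.map_map]
    simp only [Function.comp_def, Nat.cast_zero, zero_mul, add_zero, List.singleton_append]
    congr 1
    apply List.map_congr_left
    intro i _
    by_cases hdpos : 0 < d
    · have hdt : ((d.toNat : Int)) = d := by omega
      rw [hdt]
      apply List.map_congr_left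
      intro j _
      push_cast
      ring
    · have hz : d.toNat = 0 := by omega
      simp [hz]

-- B's chunking loop over a range of length m*d (d ≥ 1) yields m consecutive d-sized ranges
theorem mslChunk_eq (d : Int) (hd : 1 ≤ d) (m : Nat) :
    ∀ (fuel : Nat) (a : Int) (rows : List (List Int)),
      (PySem.List.pyRange a (a + (m : Int) * d) 1).length ≤ fuel →
      mslChunk fuel d (PySem.List.pyRange a (a + (m : Int) * d) 1) rows =
        rows ++ ((List.range m).map
          (fun (i : Nat) => PySem.List.pyRange (a + (i : Int) * d) (a + (i : Int) * d + d) 1)).reverse := by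
  induction m with
  | zero =>
    intro fuel a rows _
    rw [PySem.List.pyRange_one_eq_nil (by omega)]
    cases fuel <;> simp [mslChunk]
  | succ m ih =>
    intro fuel a rows hfuel
    have hmul : (m : Int) * d + d = ((m : Int) + 1) * d := by ring
    have hsplit : PySem.List.pyRange a (a + ((m : Int) + 1) * d) 1 =
        PySem.List.pyRange a (a + (m : Int) * d) 1 ++
          PySem.List.pyRange (a + (m : Int) * d) (a + ((m : Int) + 1) * d) 1 :=
      PySem.List.pyRange_one_append a (a + (m : Int) * d) _ (by nlinarith) (by nlinarith)
    have hlen1 : (PySem.List.pyRange a (a + (m : Int) * d) 1).length = ((m : Int) * d).toNat := by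
      rw [PySem.List.length_pyRange_one]; omega
    have hlenall : (PySem.List.pyRange a (a + ((m : Int) + 1) * d) 1).length = (((m : Int) + 1) * d).toNat := by
      rw [PySem.List.length_pyRange_one]; omega
    have hmd : (0:Int) ≤ (m : Int) * d := by positivity
    have hflen : 0 < (PySem.List.pyRange a (a + ((m : Int) + 1) * d) 1).length := by
      rw [hlenall]; omega
    have hne : PySem.List.pyRange a (a + ((m : Int) + 1) * d) 1 ≠ [] := by
      intro h; rw [h] at hflen; simp at hflen
    push_cast at hfuel ⊢
    obtain ⟨f, rfl⟩ : ∃ f, fuel = f + 1 := by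
      rcases fuel with _ | f
      · exfalso; omega
      · exact ⟨f, rfl⟩
    rw [mslChunk, if_neg hne]
    have hlen2 : (PySem.List.pyRange (a + (m : Int) * d) (a + ((m : Int) + 1) * d) 1).length = d.toNat := by
      rw [PySem.List.length_pyRange_one]; omega
    have hdneg : (-d : Int) = -((d.toNat : Nat) : Int) := by omega
    have htake : PySem.List.slice (PySem.List.pyRange a (a + ((m : Int) + 1) * d) 1) none (some (-d)) =
        PySem.List.pyRange a (a + (m : Int) * d) 1 := by
      rw [hdneg, PySem.List.slice_to_neg_natCast _ _ (by omega), hsplit, List.length_append,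
        hlen1, hlen2]
      have h : ((m : Int) * d).toNat + d.toNat - d.toNat = ((m : Int) * d).toNat := by omega
      rw [h]
      exact List.take_left' hlen1
    have hdrop : PySem.List.slice (PySem.List.pyRange a (a + ((m : Int) + 1) * d) 1) (some (-d)) none =
        PySem.List.pyRange (a + (m : Int) * d) (a + (m : Int) * d + d) 1 := by
      rw [hdneg, PySem.List.slice_from_neg_natCast _ _ (by omega), hsplit, List.length_append,
        hlen1, hlen2]
      have h : ((m : Int) * d).toNat + d.toNat - d.toNat = ((m : Int) * d).toNat := by omega
      rw [h, List.drop_left' hlen1]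
      congr 1
      omega
    push_cast at htake hdrop
    rw [htake, hdrop]
    rw [ih f a _ ?_]
    · rw [List.range_succ, List.map_append, List.reverse_append, List.append_assoc]
      simp
    · rw [hlen1]
      rw [hlenall] at hfuel
      omega

theorem make_square_list_eq_alt (d : Int) :
    make_square_list d = make_square_list_alt d := by
  unfold make_square_list make_square_list_alt
  by_cases hd : d ≤ 0
  · rw [mslOuter_eq d 0 0 0 [] (by omega)]
    simp [hd]
  · rw [if_neg hd]
    have hd1 : 1 ≤ d := by omega
    have hdd : d * d = 0 + (d.toNat : Int) * d := by
      have : (d.toNat : Int) = d := by omega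
      rw [this]; ring
    rw [mslOuter_eq d ((d - 0).toNat) 0 0 [] rfl]
    simp only [List.nil_append, hdd]
    rw [mslChunk_eq d hd1 d.toNat _ 0 [] (le_refl _)]
    simp only [List.nil_append, List.reverse_reverse]
    have h0 : (d - (0:Int)).toNat = d.toNat := by omega
    rw [h0]
    apply List.map_congr_left
    intro i _
    rw [PySem.List.pyRange_one]
    have hl : ((0 + (i : Int) * d + d) - (0 + (i : Int) * d)).toNat = d.toNat := by omega
    rw [hl]

-- ===== VERDICT =====
theorem make_square_list_spec : Claim_equal_make_square_list := by
  intro d _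
  unfold Spec_make_square_list
  exact make_square_list_eq_alt d
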